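-- pv_equiv track=rewrite | github.com/axellbrendow/leetcode | find-permutation-v1.py | find_lexicographically_smallest_permutation
-- ===== SOURCE A (Python) =====
-- def find_lexicographically_smallest_permutation(signature):  # signature = 'DI'
-- 	n = len(signature) + 1  # 3
--
-- 	def dfs(arr, index):  # arr = [2, 1, 3]
-- 		if index >= len(signature):
-- 			return True
-- 		for i in range(1, n + 1):  # i = 1  |  i = 3
-- 			if signature[index] == 'D':
-- 				if i < arr[-1] and not i in arr:
-- 					arr.append(i)
-- 					if dfs(arr, index + 1): return True
-- 					arr.pop()
-- 			elif i > arr[-1] and not i in arr: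
-- 				arr.append(i)
-- 				if dfs(arr, index + 1): return True
-- 				arr.pop()
-- 		return False
--
-- 	for i in range(1, n + 1):  # i = 2
-- 		arr = [i]  # [2]
-- 		if dfs(arr, 0):
-- 			return arr
-- 	return None
-- ===== SOURCE B (Python) =====
-- def find_lexicographically_smallest_permutation(signature):
--     # Greedy O(n): push 1..n on a stack and flush it at the end of every
--     # maximal run of 'D' constraints, which reverses each descending block.
--     res = []
--     stack = []
--     n = len(signature) + 1
--     for i in range(1, n + 1):
--         stack.append(i)
--         if i == n or signature[i - 1] != 'D':
--             while stack:
--                 res.append(stack.pop())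
--     return res
-- ===== Notes on version B (the rewrite author's own statement) =====
-- stated objective: faster
-- what changed: Replaced the exponential backtracking DFS over all candidate values with the O(n) greedy stack method that emits 1..n and reverses each maximal run of 'D' constraints.
import Mathlib
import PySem

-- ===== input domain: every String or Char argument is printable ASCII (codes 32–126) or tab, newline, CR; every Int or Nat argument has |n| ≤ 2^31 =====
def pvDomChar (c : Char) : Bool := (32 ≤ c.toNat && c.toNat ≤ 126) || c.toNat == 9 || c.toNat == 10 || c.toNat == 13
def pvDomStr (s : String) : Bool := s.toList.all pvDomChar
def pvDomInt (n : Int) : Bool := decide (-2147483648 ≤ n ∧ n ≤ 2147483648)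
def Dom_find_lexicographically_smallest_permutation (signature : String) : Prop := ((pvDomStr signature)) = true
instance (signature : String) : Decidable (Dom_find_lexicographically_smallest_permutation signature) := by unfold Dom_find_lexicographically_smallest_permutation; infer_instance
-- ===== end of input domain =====

-- B replaces A's exponential backtracking DFS by the O(n) greedy stack method (push 1..n,
-- flush at the end of each maximal 'D'-run); equivalence of the returned value is proved below.

-- ===== PORT A =====
-- dfs(arr, index): Python's nested backtracking search; returns the extended arr on success.
-- 'arr[-1]' is ported as arr.getLastD 0: arr is nonempty at every call (it starts as [i]).
def pvDfs (s : List Char) (arr : List Int) (index : Nat) : Option (List Int) :=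
  if h : s.length ≤ index then some arr
  else
    -- for i in range(1, n + 1): first recursive call returning a value wins (early return)
    (PySem.List.pyRange 1 ((s.length : Int) + 2) 1).findSome? (fun i =>
      if s[index]'(by omega) = 'D' then
        if i < arr.getLastD 0 ∧ ¬ i ∈ arr then pvDfs s (arr ++ [i]) (index + 1) else none
      else
        if arr.getLastD 0 < i ∧ ¬ i ∈ arr then pvDfs s (arr ++ [i]) (index + 1) else none)
  termination_by s.length - index
  decreasing_by all_goals omega

def find_lexicographically_smallest_permutation (signature : String) : Option (List Int) :=
  let s := signature.toList
  -- for i in range(1, n + 1): arr = [i]; if dfs(arr, 0): return arr — first success; else None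
  (PySem.List.pyRange 1 ((s.length : Int) + 2) 1).findSome? (fun i => pvDfs s [i] 0)

-- ===== PORT B =====
-- Greedy stack method (Source B): push 1..n; when i == n or signature[i-1] != 'D', pop the whole
-- stack into res (stack is kept top-first, so popping everything appends the stack as a list).
-- s.getD is only consulted with i < n, where 0 ≤ i-1 < len(signature), like Python's short-circuit 'or'.
def find_lexicographically_smallest_permutation_alt (signature : String) : Option (List Int) :=
  let s := signature.toList
  let n : Int := (s.length : Int) + 1
  let r := (PySem.List.pyRange 1 (n + 1) 1).foldl
    (fun (p : List Int × List Int) i =>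
      let stack := i :: p.2
      if i = n ∨ s.getD (i - 1).toNat ' ' ≠ 'D' then (p.1 ++ stack, []) else (p.1, stack))
    ([], [])
  some r.1

-- ===== PRECONDITION & SPEC =====
def Spec_find_lexicographically_smallest_permutation (signature : String) (out : Option (List Int)) : Prop := out = find_lexicographically_smallest_permutation_alt signature
instance (signature : String) (out : Option (List Int)) : Decidable (Spec_find_lexicographically_smallest_permutation signature out) := by unfold Spec_find_lexicographically_smallest_permutation; infer_instance

-- ===== CLAIM (what is proved, stated in full; the proofs are below) =====
def Claim_equal_find_lexicographically_smallest_permutation : Prop := ∀ (signature : String), Dom_find_lexicographically_smallest_permutation signature → Spec_find_lexicographically_smallest_permutation signature (find_lexicographically_smallest_permutation signature)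

-- ===== LEMMAS AND PROOFS =====

-- length of the leading run of 'D' constraints
def pvLeadD : List Char → Nat
  | [] => 0
  | c :: t => if c = 'D' then pvLeadD t + 1 else 0

-- descending list x, x-1, ..., of given length
def pvDesc (x : Int) : Nat → List Int
  | 0 => []
  | k + 1 => x :: pvDesc (x - 1) k

-- the common value both programs compute for the positions after a "clean" state with values 1..m used
def pvSpec : List Char → Int → List Int
  | [], _ => []
  | _ :: t1, m =>
    pvDesc (m + 1 + pvLeadD t1) (pvLeadD t1 + 1) ++ pvSpec (t1.drop (pvLeadD t1)) (m + 1 + pvLeadD t1)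
  termination_by t _ => t.length
  decreasing_by simp [List.length_drop]

lemma pvLeadD_le_length (t : List Char) : pvLeadD t ≤ t.length := by
  induction t with
  | nil => simp [pvLeadD]
  | cons c t ih =>
    by_cases h : c = 'D'
    · simp [pvLeadD, h]; omega
    · simp [pvLeadD, h]

lemma pvFindSome?_pyRange {β : Type} (f : Int → Option β) (b v : Int) (r : β) :
    ∀ (n : Nat) (a : Int), (v - a).toNat = n → a ≤ v → v < b →
    (∀ x, a ≤ x → x < v → f x = none) → f v = some r →
    (PySem.List.pyRange a b 1).findSome? f = some r := by
  intro n
  induction n with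
  | zero =>
    intro a hn hav hvb h0 hv
    have hva : a = v := by omega
    subst hva
    rw [PySem.List.pyRange_one_cons (by omega)]
    simp [hv]
  | succ n ih =>
    intro a hn hav hvb h0 hv
    have hlt : a < v := by omega
    rw [PySem.List.pyRange_one_cons (by omega), List.findSome?_cons, h0 a le_rfl hlt]
    exact ih (a + 1) (by omega) (by omega) hvb (fun x hx hx' => h0 x (by omega) hx') hv

lemma pvFindSome?_pyRange_none {β : Type} (f : Int → Option β) (a b : Int)
    (h : ∀ x, a ≤ x → x < b → f x = none) :
    (PySem.List.pyRange a b 1).findSome? f = none := by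
  rw [List.findSome?_eq_none_iff]
  intro x hx
  rw [PySem.List.mem_pyRange_one] at hx
  exact h x hx.1 hx.2

-- number of still-unused candidate values (among 1..n) lying below the current last element
def pvAvail (s : List Char) (arr : List Int) : Nat :=
  ((Finset.range (s.length + 1)).filter
    (fun (k : Nat) => ((k : Int) + 1) ∉ arr ∧ ((k : Int) + 1) < arr.getLastD 0)).card

lemma pvAvail_le (s : List Char) (arr : List Int) (lo hi : Int)
    (h : ∀ v : Int, 1 ≤ v → v ≤ (s.length : Int) + 1 → v ∉ arr → v < arr.getLastD 0 →
      lo ≤ v ∧ v < hi) :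
    pvAvail s arr ≤ (hi - lo).toNat := by
  unfold pvAvail
  rw [← Int.card_Ico lo hi]
  apply Finset.card_le_card_of_injOn (f := fun (k : Nat) => ((k : Int) + 1))
  · intro k hk
    simp only [Finset.coe_filter, Set.mem_setOf_eq, Finset.mem_range] at hk
    obtain ⟨hk1, hk2, hk3⟩ := hk
    have := h ((k : Int) + 1) (by omega) (by omega) hk2 hk3
    simpa only [Finset.coe_Ico, Set.mem_Ico] using this
  · intro k1 _ k2 _ hk
    simp only at hk
    omega

-- FAIL: if fewer unused values lie below the last element than the leading 'D'-run demands,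
-- the search fails.
lemma pvDfs_fail (s : List Char) : ∀ d index (arr : List Int), s.length - index = d →
    pvAvail s arr < pvLeadD (s.drop index) →
    pvDfs s arr index = none := by
  intro d
  induction d using Nat.strong_induction_on with
  | _ d ih =>
  intro index arr hd hcard
  by_cases hlen : s.length ≤ index
  · rw [List.drop_eq_nil_of_le hlen] at hcard
    simp [pvLeadD] at hcard
  · have hidx : index < s.length := by omega
    have hdrop : s.drop index = s[index] :: s.drop (index + 1) := (List.getElem_cons_drop hidx).symm
    have hD : s[index] = 'D' := by
      by_contra hne
      rw [hdrop] at hcard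
      simp [pvLeadD, hne] at hcard
    have hlead : pvLeadD (s.drop index) = pvLeadD (s.drop (index + 1)) + 1 := by
      rw [hdrop]; simp [pvLeadD, hD]
    rw [pvDfs, dif_neg hlen]
    apply pvFindSome?_pyRange_none
    intro x hx1 hx2
    simp only [hD, if_true]
    by_cases hc : x < arr.getLastD 0 ∧ ¬ x ∈ arr
    · rw [if_pos hc]
      apply ih (s.length - (index + 1)) (by omega) (index + 1) (arr ++ [x]) rfl
      have hlt : pvAvail s (arr ++ [x]) < pvAvail s arr := by
        unfold pvAvail
        have hxeq : (((x - 1).toNat : Int) + 1) = x := by omega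
        have hx_mem : (x - 1).toNat ∈ (Finset.range (s.length + 1)).filter
            (fun (k : Nat) => ((k : Int) + 1) ∉ arr ∧ ((k : Int) + 1) < arr.getLastD 0) := by
          simp only [Finset.mem_filter, Finset.mem_range, hxeq]
          exact ⟨by omega, hc.2, hc.1⟩
        have hsub : (Finset.range (s.length + 1)).filter
              (fun (k : Nat) => ((k : Int) + 1) ∉ arr ++ [x] ∧
                ((k : Int) + 1) < (arr ++ [x]).getLastD 0) ⊆
            ((Finset.range (s.length + 1)).filter
              (fun (k : Nat) => ((k : Int) + 1) ∉ arr ∧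
                ((k : Int) + 1) < arr.getLastD 0)).erase (x - 1).toNat := by
          intro kk hkk
          simp only [Finset.mem_filter, Finset.mem_range, Finset.mem_erase,
            List.getLastD_concat, List.mem_append, List.mem_singleton, not_or] at hkk ⊢
          obtain ⟨h1', ⟨h2', h3'⟩, h4'⟩ := hkk
          exact ⟨by omega, h1', h2', by have := hc.1; omega⟩
        have h1 := Finset.card_le_card hsub
        rw [Finset.card_erase_of_mem hx_mem] at h1
        have h2 := Finset.card_pos.mpr ⟨_, hx_mem⟩
        omega
      omega
    · rw [if_neg hc]

-- UNIFIED invariant: from a state whose used values are {1..a} ∪ {l..m} with last = l and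
-- exactly l-1-a leading 'D' constraints remaining, dfs succeeds with the greedy continuation.
lemma pvDfs_run (s : List Char) : ∀ d index (arr : List Int) (a l m : Int),
    s.length - index = d →
    0 ≤ a → a < l → l ≤ m → m ≤ (s.length : Int) + 1 →
    arr.getLast? = some l →
    (∀ v : Int, v ∈ arr ↔ (1 ≤ v ∧ v ≤ a) ∨ (l ≤ v ∧ v ≤ m)) →
    (index : Int) = a + m - l →
    pvLeadD (s.drop index) = (l - 1 - a).toNat →
    pvDfs s arr index =
      some (arr ++ pvDesc (l - 1) (l - 1 - a).toNat ++ pvSpec (s.drop (index + (l - 1 - a).toNat)) m) := by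
  intro d
  induction d using Nat.strong_induction_on with
  | _ d ih =>
  intro index arr a l m hd ha0 hal hlm hmn hlast hmem hidx hlead
  have hlastD : arr.getLastD 0 = l := by rw [List.getLastD_eq_getLast?, hlast]; rfl
  by_cases hlen : s.length ≤ index
  · have ht : s.drop index = [] := List.drop_eq_nil_of_le hlen
    have h0 : (l - 1 - a).toNat = 0 := by rw [ht] at hlead; simp [pvLeadD] at hlead; omega
    rw [pvDfs, dif_pos hlen, h0]
    simp only [Nat.add_zero]
    rw [ht]
    simp [pvDesc, pvSpec]
  · have hidx' : index < s.length := by omega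
    have hdrop : s.drop index = s[index] :: s.drop (index + 1) := (List.getElem_cons_drop hidx').symm
    rw [pvDfs, dif_neg hlen]
    by_cases hrun : a + 1 < l
    · -- mid-run: the next constraint is 'D' and the only survivable choice is l-1
      have hge1 : 1 ≤ pvLeadD (s.drop index) := by omega
      have hD : s[index] = 'D' := by
        by_contra hne
        rw [hdrop] at hge1; simp [pvLeadD, hne] at hge1
      have hlead' : pvLeadD (s.drop (index + 1)) = (l - 1 - 1 - a).toNat := by
        rw [hdrop] at hlead; simp [pvLeadD, hD] at hlead; omega
      refine pvFindSome?_pyRange _ _ (l - 1) _ _ 1 rfl (by omega) (by omega) ?_ ?_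
      · -- all candidates below l-1 fail
        intro x hx1 hx2
        simp only [hD, if_true]
        by_cases hcx : x < arr.getLastD 0 ∧ ¬ x ∈ arr
        · rw [if_pos hcx]
          have hxa : a + 1 ≤ x := by
            by_contra hxa
            exact hcx.2 ((hmem x).mpr (Or.inl ⟨hx1, by omega⟩))
          apply pvDfs_fail s (s.length - (index + 1)) (index + 1) _ rfl
          have hb := pvAvail_le s (arr ++ [x]) (a + 1) x ?_
          · rw [hlead']; omega
          · intro v hv1 hv2 hv3 hv4
            rw [List.getLastD_concat] at hv4
            simp only [List.mem_append, List.mem_singleton, not_or] at hv3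
            have hva : ¬ (1 ≤ v ∧ v ≤ a) := fun hcon => hv3.1 ((hmem v).mpr (Or.inl hcon))
            exact ⟨by omega, hv4⟩
        · rw [if_neg hcx]
      · -- the candidate l-1 continues the forced descent
        simp only [hD, if_true]
        have hcv : l - 1 < arr.getLastD 0 ∧ ¬ l - 1 ∈ arr := by
          rw [hlastD]
          refine ⟨by omega, fun hcon => ?_⟩
          rcases (hmem (l - 1)).mp hcon with h | h <;> omega
        rw [if_pos hcv]
        have hmem' : ∀ v : Int, v ∈ arr ++ [l - 1] ↔ (1 ≤ v ∧ v ≤ a) ∨ (l - 1 ≤ v ∧ v ≤ m) := by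
          intro v
          simp only [List.mem_append, List.mem_singleton, hmem v]
          constructor
          · rintro ((h | h) | h) <;> [exact Or.inl h; exact Or.inr ⟨by omega, h.2⟩;
              exact Or.inr ⟨by omega, by omega⟩]
          · rintro (h | h)
            · exact Or.inl (Or.inl h)
            · by_cases hvl : v = l - 1
              · exact Or.inr hvl
              · exact Or.inl (Or.inr ⟨by omega, h.2⟩)
        have hrec := ih (s.length - (index + 1)) (by omega) (index + 1) (arr ++ [l - 1]) a (l - 1) m
          rfl ha0 (by omega) (by omega) hmn List.getLast?_concat hmem' (by omega) hlead'
        rw [hrec]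
        have hk : (l - 1 - a).toNat = (l - 1 - 1 - a).toNat + 1 := by omega
        have hix : index + (l - 1 - a).toNat = index + 1 + (l - 1 - 1 - a).toNat := by omega
        rw [hix, hk]
        simp [pvDesc, List.append_assoc]
    · -- clean state: l = a+1, the next constraint is not 'D'
      have hleq : l = a + 1 := by omega
      have h0' : (l - 1 - a).toNat = 0 := by omega
      have hnD : ¬ s[index] = 'D' := by
        intro hDD
        rw [hdrop] at hlead; simp [pvLeadD, hDD] at hlead; omega
      set k := pvLeadD (s.drop (index + 1)) with hkdef
      have hkle : k ≤ s.length - (index + 1) := by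
        have := pvLeadD_le_length (s.drop (index + 1)); simpa using this
      have hmidx : (m : Int) = (index : Int) + 1 := by omega
      refine pvFindSome?_pyRange _ _ (m + 1 + k) _ _ 1 rfl (by omega) (by omega) ?_ ?_
      · -- candidates below m+1+k fail (used, or too few values below them for the coming run)
        intro x hx1 hx2
        rw [if_neg hnD]
        by_cases hcx : arr.getLastD 0 < x ∧ ¬ x ∈ arr
        · rw [if_pos hcx]
          have hxm : m + 1 ≤ x := by
            by_contra hxm
            exact hcx.2 ((hmem x).mpr (by omega))
          apply pvDfs_fail s (s.length - (index + 1)) (index + 1) _ rfl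
          have hb := pvAvail_le s (arr ++ [x]) (m + 1) x ?_
          · rw [← hkdef]; omega
          · intro v hv1 hv2 hv3 hv4
            rw [List.getLastD_concat] at hv4
            simp only [List.mem_append, List.mem_singleton, not_or] at hv3
            have hva : ¬ ((1 ≤ v ∧ v ≤ a) ∨ (l ≤ v ∧ v ≤ m)) :=
              fun hcon => hv3.1 ((hmem v).mpr hcon)
            exact ⟨by omega, hv4⟩
        · rw [if_neg hcx]
      · -- the candidate m+1+k opens the next descending block
        simp only [if_neg hnD]
        have hcv : arr.getLastD 0 < m + 1 + (k : Int) ∧ ¬ m + 1 + (k : Int) ∈ arr := by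
          rw [hlastD]
          refine ⟨by omega, fun hcon => ?_⟩
          rcases (hmem _).mp hcon with h | h <;> omega
        rw [if_pos hcv]
        have hmem' : ∀ v : Int, v ∈ arr ++ [m + 1 + (k : Int)] ↔
            (1 ≤ v ∧ v ≤ m) ∨ (m + 1 + k ≤ v ∧ v ≤ m + 1 + k) := by
          intro v
          simp only [List.mem_append, List.mem_singleton, hmem v]
          constructor
          · rintro ((h | h) | h) <;> [exact Or.inl ⟨h.1, by omega⟩;
              exact Or.inl ⟨by omega, h.2⟩; exact Or.inr (by omega)]
          · rintro (h | h)
            · by_cases hva : v ≤ a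
              · exact Or.inl (Or.inl ⟨h.1, hva⟩)
              · exact Or.inl (Or.inr ⟨by omega, h.2⟩)
            · exact Or.inr (by omega)
        have hrec := ih (s.length - (index + 1)) (by omega) (index + 1)
          (arr ++ [m + 1 + (k : Int)]) m (m + 1 + k) (m + 1 + k)
          rfl (by omega) (by omega) (by omega) (by omega) List.getLast?_concat hmem'
          (by push_cast; omega) (by rw [← hkdef]; omega)
        rw [hrec]
        have hk2 : (m + 1 + (k : Int) - 1 - m).toNat = k := by omega
        rw [h0', hk2]
        simp only [Nat.add_zero]
        rw [hdrop]
        simp only [pvSpec, ← hkdef]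
        simp [pvDesc, List.append_assoc, List.drop_drop]

-- A computes the greedy value
lemma pvA_eq (s : List Char) :
    (PySem.List.pyRange 1 ((s.length : Int) + 2) 1).findSome? (fun i => pvDfs s [i] 0) =
      some (pvDesc ((pvLeadD s : Int) + 1) (pvLeadD s + 1) ++ pvSpec (s.drop (pvLeadD s)) ((pvLeadD s : Int) + 1)) := by
  have hk0 := pvLeadD_le_length s
  refine pvFindSome?_pyRange _ _ ((pvLeadD s : Int) + 1) _ _ 1 rfl (by omega) (by omega) ?_ ?_
  · -- start values 1..leadD s fail: not enough room to descend
    intro x hx1 hx2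
    apply pvDfs_fail s (s.length - 0) 0 [x] rfl
    have hb := pvAvail_le s [x] 1 x ?_
    · simp only [List.drop_zero]
      omega
    · intro v hv1 hv2 hv3 hv4
      simp only [List.getLastD_eq_getLast?, List.getLast?_singleton, Option.getD_some] at hv4
      exact ⟨hv1, hv4⟩
  · -- the start value leadD s + 1 succeeds with the greedy continuation
    have hmem1 : ∀ v : Int, v ∈ [((pvLeadD s : Int) + 1)] ↔
        (1 ≤ v ∧ v ≤ 0) ∨ ((pvLeadD s : Int) + 1 ≤ v ∧ v ≤ (pvLeadD s : Int) + 1) := by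
      intro v
      simp only [List.mem_singleton]
      constructor
      · intro h; exact Or.inr (by omega)
      · rintro (h | h) <;> omega
    have hlead1 : pvLeadD (s.drop 0) = ((pvLeadD s : Int) + 1 - 1 - 0).toNat := by
      simp only [List.drop_zero]; omega
    have hrun := pvDfs_run s s.length 0 [((pvLeadD s : Int) + 1)] 0 ((pvLeadD s : Int) + 1)
      ((pvLeadD s : Int) + 1) rfl le_rfl (by omega) le_rfl (by omega) List.getLast?_singleton
      hmem1 (by omega) hlead1
    rw [hrun]
    have h1 : ((pvLeadD s : Int) + 1 - 1 - 0).toNat = pvLeadD s := by omega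
    have h2 : (pvLeadD s : Int) + 1 - 1 = (pvLeadD s : Int) := by ring
    rw [h1]
    simp only [Nat.zero_add]
    simp [pvDesc, h2]

-- B's fold flushes one descending block per maximal 'D'-run
lemma pvFoldB (s : List Char) : ∀ d p, s.length - p = d → p ≤ s.length → ∀ (R : List Int) (j : Nat),
    (PySem.List.pyRange ((p : Int) + 1) (((s.length : Int) + 1) + 1) 1).foldl
      (fun (q : List Int × List Int) i =>
        let stack := i :: q.2
        if i = (s.length : Int) + 1 ∨ s.getD (i - 1).toNat ' ' ≠ 'D' then (q.1 ++ stack, [])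
        else (q.1, stack))
      (R, pvDesc (p : Int) j) =
    (R ++ pvDesc ((p : Int) + 1 + pvLeadD (s.drop p)) (pvLeadD (s.drop p) + 1 + j) ++
      pvSpec ((s.drop p).drop (pvLeadD (s.drop p))) ((p : Int) + 1 + pvLeadD (s.drop p)), []) := by
  intro d
  induction d using Nat.strong_induction_on with
  | _ d ih =>
  intro p hd hp R j
  have hx1 : (p : Int) + 1 - 1 = (p : Int) := by ring
  rw [PySem.List.pyRange_one_cons (by omega), List.foldl_cons]
  by_cases hpe : p = s.length
  · -- last iteration: i = n, flush everything
    rw [if_pos (Or.inl (by omega))]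
    have hzero : (((s.length : Int) + 1) + 1 - ((p : Int) + 1 + 1)).toNat = 0 := by omega
    rw [PySem.List.pyRange_one, hzero]
    have hdp : s.drop p = [] := by rw [hpe]; exact List.drop_length
    rw [hdp]
    simp only [pvLeadD]
    rw [Nat.add_comm 1 j]
    simp [pvDesc, hx1, pvSpec]
  · have hplt : p < s.length := by omega
    have hm1 : ((p : Int) + 1 - 1).toNat = p := by omega
    have hgd : s.getD ((p : Int) + 1 - 1).toNat ' ' = s[p] := by
      rw [hm1]; exact List.getD_eq_getElem s ' ' hplt
    have hdrop : s.drop p = s[p] :: s.drop (p + 1) := (List.getElem_cons_drop hplt).symm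
    have hne : ((p : Int) + 1) ≠ (s.length : Int) + 1 := by omega
    have hstk : ((p : Int) + 1) :: pvDesc (p : Int) j = pvDesc ((p : Int) + 1) (j + 1) := by
      simp [pvDesc, hx1]
    by_cases hDp : s[p] = 'D'
    · -- no flush: the block grows
      rw [if_neg (not_or.mpr ⟨hne, by rw [hgd, hDp]; simp⟩)]
      have hih := ih (s.length - (p + 1)) (by omega) (p + 1) rfl (by omega) R (j + 1)
      push_cast at hih
      show (PySem.List.pyRange ((p : Int) + 1 + 1) (((s.length : Int) + 1) + 1) 1).foldl _
          (R, ((p : Int) + 1) :: pvDesc (p : Int) j) = _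
      rw [hstk, hih]
      have hl : pvLeadD (s.drop p) = pvLeadD (s.drop (p + 1)) + 1 := by
        rw [hdrop]; simp [pvLeadD, hDp]
      have hdd : (s.drop p).drop (pvLeadD (s.drop (p + 1)) + 1) =
          (s.drop (p + 1)).drop (pvLeadD (s.drop (p + 1))) := by
        rw [hdrop, List.drop_succ_cons]
      rw [hl, hdd]
      have e1 : (p : Int) + 1 + ((pvLeadD (s.drop (p + 1)) + 1 : Nat) : Int) =
          (p : Int) + 1 + 1 + (pvLeadD (s.drop (p + 1)) : Int) := by push_cast; ring
      have e2 : pvLeadD (s.drop (p + 1)) + 1 + 1 + j = pvLeadD (s.drop (p + 1)) + 1 + (j + 1) := by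
        omega
      rw [e1, e2]
    · -- flush: the block ends here
      rw [if_pos (Or.inr (by rw [hgd]; exact hDp))]
      have hih := ih (s.length - (p + 1)) (by omega) (p + 1) rfl (by omega)
        (R ++ (((p : Int) + 1) :: pvDesc (p : Int) j)) 0
      push_cast at hih
      have hstk0 : pvDesc ((p : Int) + 1) 0 = [] := rfl
      rw [hstk0] at hih
      rw [hih]
      have hl : pvLeadD (s.drop p) = 0 := by
        rw [hdrop]; simp [pvLeadD, hDp]
      rw [hl]
      have hsp : pvSpec (s.drop p) ((p : Int) + 1) =
          pvDesc ((p : Int) + 1 + 1 + pvLeadD (s.drop (p + 1))) (pvLeadD (s.drop (p + 1)) + 1) ++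
            pvSpec ((s.drop (p + 1)).drop (pvLeadD (s.drop (p + 1))))
              ((p : Int) + 1 + 1 + pvLeadD (s.drop (p + 1))) := by
        rw [hdrop]
        simp only [pvSpec]
      simp only [Nat.cast_zero, add_zero, List.drop_zero, Nat.zero_add]
      rw [hsp, hstk]
      simp only [List.append_assoc]
      rw [Nat.add_comm 1 j]

-- B's fold computes the greedy value
lemma pvB_eq (s : List Char) :
    ((PySem.List.pyRange 1 (((s.length : Int) + 1) + 1) 1).foldl
      (fun (p : List Int × List Int) i =>
        let stack := i :: p.2
        if i = (s.length : Int) + 1 ∨ s.getD (i - 1).toNat ' ' ≠ 'D' then (p.1 ++ stack, []) else (p.1, stack))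
      ([], [])).1 =
      pvDesc ((pvLeadD s : Int) + 1) (pvLeadD s + 1) ++ pvSpec (s.drop (pvLeadD s)) ((pvLeadD s : Int) + 1) := by
  have h := pvFoldB s s.length 0 rfl (Nat.zero_le _) [] 0
  refine (congrArg Prod.fst h).trans ?_
  simp only [List.drop_zero, Nat.add_zero, List.nil_append]
  have e : ((0 : Nat) : Int) + 1 + ((pvLeadD s : Nat) : Int) = (pvLeadD s : Int) + 1 := by
    push_cast; ring
  rw [e]

-- ===== VERDICT (by name: the statement is the Claim_ definition above) =====
theorem find_lexicographically_smallest_permutation_spec : Claim_equal_find_lexicographically_smallest_permutation := by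
  intro signature _
  unfold Spec_find_lexicographically_smallest_permutation
  unfold find_lexicographically_smallest_permutation find_lexicographically_smallest_permutation_alt
  rw [pvA_eq]
  exact congrArg some (pvB_eq signature.toList).symm
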